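-- pv_equiv track=rewrite | github.com/Zakura0/AoC24 | d07/d07p2.py | allSolutions
-- ===== SOURCE A (Python) =====
-- def concat_int(x, y):
--     return int("".join(str(num) for num in [x, y]))
--
-- def allSolutions(nums):
--     if len(nums) == 1:
--         return{nums[0]}
--     subset = allSolutions(nums[:-1])
--     multiplication = {num * nums[-1] for num in subset}
--     addition = {num + nums[-1] for num in subset}
--     concat = {concat_int(num, nums[-1]) for num in subset}
--     return multiplication | addition | concat
-- ===== SOURCE B (Python) =====
-- def concat_int(x, y):
--     return int(str(x) + str(y))
--
-- def allSolutions(nums):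
--     values = {nums[0]}
--     for n in nums[1:]:
--         values = ({v * n for v in values}
--                   | {v + n for v in values}
--                   | {concat_int(v, n) for v in values})
--     return values
-- ===== Notes on version B (the rewrite author's own statement) =====
-- stated objective: simpler
-- what changed: Replaces the back-to-front recursion over the all-but-last prefix (which copies a slice at every level) by a single forward iterative fold over the tail starting from the singleton set of the first element.
import Mathlib
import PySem

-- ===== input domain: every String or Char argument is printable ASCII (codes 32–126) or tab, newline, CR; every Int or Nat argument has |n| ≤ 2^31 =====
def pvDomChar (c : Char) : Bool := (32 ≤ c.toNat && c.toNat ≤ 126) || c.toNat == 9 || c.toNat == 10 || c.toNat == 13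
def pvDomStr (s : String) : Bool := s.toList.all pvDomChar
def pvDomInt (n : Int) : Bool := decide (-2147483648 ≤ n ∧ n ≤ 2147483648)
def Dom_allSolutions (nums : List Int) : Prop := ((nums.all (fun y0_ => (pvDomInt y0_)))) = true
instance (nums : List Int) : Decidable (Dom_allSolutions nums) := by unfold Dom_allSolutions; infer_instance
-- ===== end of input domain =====

-- B replaces A's back-to-front recursion over nums[:-1] by a forward fold over nums[1:] (simpler decomposition, same values).


-- ===== PORT A =====
-- concat_int(x, y) = int(str(x) + str(y)); total form via getD — under Pre_ the joined string is
-- always a valid int literal (the ofChars? is some), so the default is never taken.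
def concatInt (x y : Int) : Int :=
  (PySem.Int.ofChars? (PySem.Int.toChars x ++ PySem.Int.toChars y)).getD 0

def allSolutions (nums : List Int) : List Int :=
  if nums.length = 1 then
    PySem.Set.ofList [(PySem.List.pyGet? nums 0).getD 0]          -- {nums[0]}
  else if h : nums = [] then
    []                                                            -- Python recurses forever here (RecursionError); excluded by Pre_
  else
    let subset := allSolutions (PySem.List.slice nums none (some (-1)))   -- nums[:-1]
    let lastN := (PySem.List.pyGet? nums (-1)).getD 0                     -- nums[-1]
    let multiplication := PySem.Set.ofList (subset.map (fun num => num * lastN))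
    let addition := PySem.Set.ofList (subset.map (fun num => num + lastN))
    let concat := PySem.Set.ofList (subset.map (fun num => concatInt num lastN))
    PySem.Set.union (PySem.Set.union multiplication addition) concat
termination_by nums.length
decreasing_by
  simp [PySem.List.slice_to_neg_one]
  have := List.length_pos_iff.mpr h
  omega

-- ===== PORT B =====
-- one loop iteration: values = {v*n for v in values} | {v+n for v in values} | {concat_int(v,n) for v in values}
def altStep (values : List Int) (n : Int) : List Int :=
  PySem.Set.union
    (PySem.Set.union (PySem.Set.ofList (values.map (fun v => v * n)))
                     (PySem.Set.ofList (values.map (fun v => v + n))))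
    (PySem.Set.ofList (values.map (fun v => concatInt v n)))

def allSolutions_alt (nums : List Int) : List Int :=
  let values := PySem.Set.ofList [(PySem.List.pyGet? nums 0).getD 0]      -- {nums[0]}
  (PySem.List.slice nums (some 1) none).foldl altStep values              -- for n in nums[1:]

-- ===== PRECONDITION & SPEC =====
-- Pre_ excludes exactly the inputs where A raises: the empty list (infinite recursion → RecursionError)
-- and lists with a negative element after position 0 (concat_int then builds e.g. "2-3" → ValueError).
def Pre_allSolutions (nums : List Int) : Prop := nums ≠ [] ∧ ∀ x ∈ nums.tail, 0 ≤ x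
instance (nums : List Int) : Decidable (Pre_allSolutions nums) := by unfold Pre_allSolutions; infer_instance
def pvWitness_allSolutions : List Int := [2, 3, 4]

def Spec_allSolutions (nums : List Int) (out : List Int) : Prop := out = allSolutions_alt nums
instance (nums : List Int) (out : List Int) : Decidable (Spec_allSolutions nums out) := by unfold Spec_allSolutions; infer_instance

-- ===== CLAIM (what is proved, stated in full; the proofs are below) =====
def Claim_equal_allSolutions : Prop := ∀ (nums : List Int), Dom_allSolutions nums → Pre_allSolutions nums → Spec_allSolutions nums (allSolutions nums)

-- ===== LEMMAS AND PROOFS =====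

-- appending one number to a nonempty list performs exactly one more step of A's recursion
lemma allSolutions_append (l : List Int) (x : Int) (hl : l ≠ []) :
    allSolutions (l ++ [x]) = altStep (allSolutions l) x := by
  have hlen : (l ++ [x]).length ≠ 1 := by
    simp only [List.length_append, List.length_cons, List.length_nil]
    have := List.length_pos_iff.mpr hl
    omega
  rw [allSolutions]
  simp only [hlen, if_false, List.append_eq_nil_iff, reduceCtorEq, and_false, dif_neg,
    not_false_iff, PySem.List.slice_to_neg_one, List.dropLast_concat,
    PySem.List.pyGet?_neg_one_append_singleton, Option.getD_some]
  rfl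

lemma allSolutions_alt_append (l : List Int) (x : Int) (hl : l ≠ []) :
    allSolutions_alt (l ++ [x]) = altStep (allSolutions_alt l) x := by
  obtain ⟨a, t, rfl⟩ := List.exists_cons_of_ne_nil hl
  simp [allSolutions_alt, PySem.List.slice_from_one, List.foldl_append]

lemma eq_of_ne_nil (l : List Int) (hl : l ≠ []) : allSolutions l = allSolutions_alt l := by
  induction l using List.reverseRecOn with
  | nil => exact absurd rfl hl
  | append_singleton l x ih =>
    rcases eq_or_ne l [] with rfl | hne
    · rw [allSolutions]
      simp [allSolutions_alt, PySem.List.slice_from_one]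
    · rw [allSolutions_append l x hne, allSolutions_alt_append l x hne, ih hne]

-- ===== VERDICT (by name: the statement is the Claim_ definition above) =====
theorem allSolutions_spec : Claim_equal_allSolutions := by
  intro nums _ hpre
  unfold Spec_allSolutions
  exact eq_of_ne_nil nums hpre.1
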